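-- pv_equiv track=rewrite | github.com/avival69/watermarking | app.py | deinterleave_bits
-- ===== SOURCE A (Python) =====
-- from typing import Dict, List, Optional, Sequence, Tuple
--
-- def deinterleave_bits(bits: Sequence[int], depth: int) -> List[int]:
--     if depth <= 1 or not bits:
--         return [bit & 1 for bit in bits]
--
--     rows = max(depth, 1)
--     cols = (len(bits) + rows - 1) // rows
--     row_lengths = [0] * rows
--     for row in range(rows):
--         start = row * cols
--         remaining = max(len(bits) - start, 0)
--         row_lengths[row] = min(cols, remaining)
--     grid = [[-1] * row_lengths[row] for row in range(rows)]
--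
--     idx = 0
--     for col in range(cols):
--         for row in range(rows):
--             if col >= row_lengths[row]:
--                 continue
--             if idx >= len(bits):
--                 break
--             grid[row][col] = bits[idx] & 1
--             idx += 1
--
--     out: List[int] = []
--     for row in range(rows):
--         for col in range(row_lengths[row]):
--             value = grid[row][col]
--             if value >= 0:
--                 out.append(value)
--     return out
-- ===== SOURCE B (Python) =====
-- from typing import List, Sequence
--
--
-- def deinterleave_bits(bits: Sequence[int], depth: int) -> List[int]:
--     if depth <= 1 or not bits:
--         return [bit & 1 for bit in bits]
--
--     n = len(bits)
--     rows = max(depth, 1)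
--     cols = (n + rows - 1) // rows
--     # column-major layout: the first n // cols rows are full (length cols) and at
--     # most one partial row of length n % cols follows, so column c holds
--     # full + (1 if c < rem else 0) bits and starts at stream offset
--     # full*c + min(c, rem).  Hence the bit at (row, col) of the row-major output
--     # sits at stream index full*col + min(col, rem) + row: gather it directly.
--     full, rem = divmod(n, cols)
--     out: List[int] = []
--     for row in range(rows):
--         length = min(cols, max(n - row * cols, 0))
--         out.extend(bits[full * col + min(col, rem) + row] & 1 for col in range(length))
--     return out
-- ===== Notes on version B (the rewrite author's own statement) =====
-- stated objective: alternative
-- what changed: A simulates the interleaving: it allocates a jagged grid, scatters the bits into it by walking columns round-robin with a running idx counter, then reads the grid back row-major; B computes the inverse permutation in closed form (the bit at output position (row,col) sits at stream index full*col + min(col,rem) + row, with full,rem = divmod(n,cols)) and gathers each output bit directly in a single row-major pass with no grid, no counter and no second pass.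
import Mathlib
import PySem

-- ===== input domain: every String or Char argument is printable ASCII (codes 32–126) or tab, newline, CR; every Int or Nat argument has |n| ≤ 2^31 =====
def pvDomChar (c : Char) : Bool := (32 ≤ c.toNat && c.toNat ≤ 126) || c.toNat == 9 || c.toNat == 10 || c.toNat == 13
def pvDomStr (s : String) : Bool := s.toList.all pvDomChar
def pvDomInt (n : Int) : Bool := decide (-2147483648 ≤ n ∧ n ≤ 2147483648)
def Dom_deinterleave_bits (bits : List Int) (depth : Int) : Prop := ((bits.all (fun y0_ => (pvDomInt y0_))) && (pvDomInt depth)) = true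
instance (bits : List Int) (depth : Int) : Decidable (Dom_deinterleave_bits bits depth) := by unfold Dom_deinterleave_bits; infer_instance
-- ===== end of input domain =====

-- B replaces A's grid simulation (scatter by round-robin column walk with a running
-- counter, then row-major read-out) with a closed-form inverse permutation: the output
-- bit at (row, col) is gathered directly from stream index full*col + min(col,rem) + row.

-- ===== PORT A =====
-- grid[row][col] = v ; row and col are nonnegative and in range wherever A executes this
def pvSetCell (grid : List (List Int)) (row col v : Int) : List (List Int) :=
  PySem.List.pySetD grid row (PySem.List.pySetD (PySem.List.pyGetD grid row []) col v)

-- A's inner 'for row in range(rows)' of the fill loop, with its `continue` and `break`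
def pvFillRows (bits row_lengths : List Int) (col : Int) :
    List Int → List (List Int) × Int → List (List Int) × Int
  | [], st => st
  | row :: rest, (grid, idx) =>
    if PySem.List.pyGetD row_lengths row 0 ≤ col then        -- continue
      pvFillRows bits row_lengths col rest (grid, idx)
    else if (bits.length : Int) ≤ idx then (grid, idx)       -- break
    else
      pvFillRows bits row_lengths col rest
        (pvSetCell grid row col (PySem.Int.mod (PySem.List.pyGetD bits idx 0) 2), idx + 1)

def deinterleave_bits (bits : List Int) (depth : Int) : List Int :=
  if depth ≤ 1 ∨ bits = [] then
    bits.map (fun bit => PySem.Int.mod bit 2)                -- bit & 1 = floor-mod 2 (exact)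
  else
    let rows : Int := max depth 1
    let cols : Int := PySem.Int.floordiv ((bits.length : Int) + rows - 1) rows
    let row_lengths : List Int := (PySem.List.pyRange 0 rows 1).map (fun row =>
      let start := row * cols
      let remaining := max ((bits.length : Int) - start) 0
      min cols remaining)
    let grid0 : List (List Int) := (PySem.List.pyRange 0 rows 1).map (fun row =>
      List.replicate (PySem.List.pyGetD row_lengths row 0).toNat (-1))
    let p := (PySem.List.pyRange 0 cols 1).foldl
      (fun st col => pvFillRows bits row_lengths col (PySem.List.pyRange 0 rows 1) st)
      (grid0, 0)
    (PySem.List.pyRange 0 rows 1).foldl (fun out row =>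
      (PySem.List.pyRange 0 (PySem.List.pyGetD row_lengths row 0) 1).foldl (fun out col =>
        let value := PySem.List.pyGetD (PySem.List.pyGetD p.1 row []) col (-1)
        if 0 ≤ value then out ++ [value] else out) out) []

-- ===== PORT B =====
def deinterleave_bits_alt (bits : List Int) (depth : Int) : List Int :=
  if depth ≤ 1 ∨ bits = [] then
    bits.map (fun bit => PySem.Int.mod bit 2)                -- bit & 1 = floor-mod 2 (exact)
  else
    let n : Int := bits.length
    let rows : Int := max depth 1
    let cols : Int := PySem.Int.floordiv (n + rows - 1) rows
    let full : Int := PySem.Int.floordiv n cols              -- divmod(n, cols)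
    let rem : Int := PySem.Int.mod n cols
    (PySem.List.pyRange 0 rows 1).foldl (fun out row =>
      let length := min cols (max (n - row * cols) 0)
      out ++ (PySem.List.pyRange 0 length 1).map (fun col =>
        PySem.Int.mod (PySem.List.pyGetD bits (full * col + min col rem + row) 0) 2)) []

-- ===== PRECONDITION & SPEC =====
def Spec_deinterleave_bits (bits : List Int) (depth : Int) (out : List Int) : Prop := out = deinterleave_bits_alt bits depth
instance (bits : List Int) (depth : Int) (out : List Int) : Decidable (Spec_deinterleave_bits bits depth out) := by unfold Spec_deinterleave_bits; infer_instance

-- ===== CLAIM (what is proved, stated in full; the proofs are below) =====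
def Claim_equal_deinterleave_bits : Prop := ∀ (bits : List Int) (depth : Int), Dom_deinterleave_bits bits depth → Spec_deinterleave_bits bits depth (deinterleave_bits bits depth)

-- ===== LEMMAS AND PROOFS =====

-- the value B gathers for output cell (r, c)
def pvT (bits : List Int) (full rem r c : Int) : Int :=
  PySem.Int.mod (PySem.List.pyGetD bits (full * c + min c rem + r) 0) 2

-- number of bits column c receives
def pvK (full rem c : Int) : Int := full + (if c < rem then 1 else 0)

-- stream offset at which column c starts
def pvOff (full rem c : Int) : Int := full * c + min c rem

lemma pv_mod2_nonneg (b : Int) : 0 ≤ PySem.Int.mod b 2 := by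
  rw [PySem.Int.mod_eq_emod_of_pos (by norm_num)]; exact Int.emod_nonneg b (by norm_num)

lemma pv_shape_len {L : List Int} {g : List (List Int)} (hS : g.map (fun row => (row.length : Int)) = L) : g.length = L.length := by
  rw [← hS]; simp

lemma pv_shape_row {L : List Int} {g : List (List Int)} (hS : g.map (fun row => (row.length : Int)) = L) (r : Nat) (hr : r < g.length) :
    ((g.getD r []).length : Int) = L.getD r 0 := by
  have hr' : r < L.length := by rw [← pv_shape_len hS]; exact hr
  rw [List.getD_eq_getElem _ _ hr, List.getD_eq_getElem _ _ hr']
  simp [← hS]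

-- context: all the arithmetic facts about n, rows, cols, full, rem and the row_lengths list
structure pvCtx (bits L : List Int) (n rows cols full rem : Int) : Prop where
  hn : n = (bits.length : Int)
  hn1 : 1 ≤ n
  hrows : 1 ≤ rows
  hcols : 1 ≤ cols
  hnle : n ≤ rows * cols
  hnfr : n = full * cols + rem
  hrem0 : 0 ≤ rem
  hremc : rem < cols
  hfull0 : 0 ≤ full
  hLlen : (L.length : Int) = rows
  hLget : ∀ rN : Nat, rN < L.length → L.getD rN 0 = min cols (max (n - (rN : Int) * cols) 0)

-- a cell (r, c) exists in A's grid  ↔  column c reaches row r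
lemma pv_valid {bits L : List Int} {n rows cols full rem : Int}
    (ctx : pvCtx bits L n rows cols full rem) (r c : Int)
    (hr0 : 0 ≤ r) (hc0 : 0 ≤ c) (hc : c < cols) :
    (c < min cols (max (n - r * cols) 0)) ↔ r < pvK full rem c := by
  obtain ⟨_, _, _, _, _, hnfr, hrem0, hremc, hfull0, _, _⟩ := ctx
  have hL : (c < min cols (max (n - r * cols) 0)) ↔ r * cols + c < n := by omega
  rw [hL]
  unfold pvK
  rcases lt_trichotomy r full with h | h | h
  · have h1 := mul_le_mul_of_nonneg_right (by omega : r + 1 ≤ full) (by omega : (0:Int) ≤ cols)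
    have h2 : (r + 1) * cols = r * cols + cols := by ring
    split_ifs <;> omega
  · subst h
    split_ifs <;> omega
  · have h1 := mul_le_mul_of_nonneg_right (by omega : full + 1 ≤ r) (by omega : (0:Int) ≤ cols)
    have h2 : (full + 1) * cols = full * cols + cols := by ring
    split_ifs <;> omega

lemma pv_off_succ (full rem c : Int) : pvOff full rem (c + 1) = pvOff full rem c + pvK full rem c := by
  unfold pvOff pvK
  have h : full * (c + 1) = full * c + full := by ring
  split_ifs <;> omega

lemma pv_off_bound {bits L : List Int} {n rows cols full rem : Int}
    (ctx : pvCtx bits L n rows cols full rem) (c : Int) (hc0 : 0 ≤ c) (hc : c < cols) :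
    pvOff full rem c + pvK full rem c ≤ n := by
  obtain ⟨_, _, _, _, _, hnfr, hrem0, hremc, hfull0, _, _⟩ := ctx
  unfold pvOff pvK
  have h1 := mul_le_mul_of_nonneg_left (by omega : c + 1 ≤ cols) hfull0
  have h2 : full * (c + 1) = full * c + full := by ring
  split_ifs <;> omega

lemma pv_k_le_rows {bits L : List Int} {n rows cols full rem : Int}
    (ctx : pvCtx bits L n rows cols full rem) (c : Int) (hc0 : 0 ≤ c) : pvK full rem c ≤ rows := by
  obtain ⟨_, _, hrows, hcols, hnle, hnfr, hrem0, hremc, hfull0, _, _⟩ := ctx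
  unfold pvK
  have hfle : full ≤ rows := by
    by_contra h
    push_neg at h
    have h1 := mul_le_mul_of_nonneg_right (by omega : rows + 1 ≤ full) (by omega : (0:Int) ≤ cols)
    have h2 : (rows + 1) * cols = rows * cols + cols := by ring
    omega
  split_ifs with hif
  · -- then rem > 0, so full < rows
    by_contra h
    push_neg at h
    have hfr : full = rows := by omega
    subst hfr
    omega
  · omega

-- invariant of A's fill: columns before c are fully written with B's gather values,
-- column c is written for rows below r₀, everything else still holds the sentinel -1
def pvInvA (bits L : List Int) (full rem c r₀ : Int) (st : List (List Int) × Int) : Prop :=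
  st.1.map (fun row => (row.length : Int)) = L ∧
  st.2 = pvOff full rem c + min r₀ (pvK full rem c) ∧
  ∀ r, r < st.1.length → ∀ c', c' < (st.1.getD r []).length →
    (st.1.getD r []).getD c' 0 =
      if ((c' : Int) < c ∨ ((c' : Int) = c ∧ (r : Int) < r₀)) then pvT bits full rem r c' else -1

-- one full pass of A's inner row loop extends the invariant from r₀ to all rows
lemma pv_fillA {bits L : List Int} {n rows cols full rem : Int}
    (ctx : pvCtx bits L n rows cols full rem) (c : Int) (hc0 : 0 ≤ c) (hc : c < cols) :
    ∀ (fuel : Nat) (r₀ : Int), 0 ≤ r₀ → r₀ ≤ rows → (rows - r₀).toNat = fuel →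
    ∀ st, pvInvA bits L full rem c r₀ st →
    pvInvA bits L full rem c rows (pvFillRows bits L c (PySem.List.pyRange r₀ rows 1) st) := by
  intro fuel
  induction fuel with
  | zero =>
    intro r₀ h0r hle hfuel st hInv
    have hr : r₀ = rows := by omega
    rw [hr] at hInv
    rw [hr, PySem.List.pyRange_one_eq_nil (le_refl rows)]
    simpa [pvFillRows] using hInv
  | succ fuel ih =>
    intro r₀ h0r hle hfuel st hInv
    have hlt : r₀ < rows := by omega
    obtain ⟨g, idx⟩ := st
    obtain ⟨h1, h2, h3⟩ := hInv
    dsimp only at h1 h2 h3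
    have hglen : g.length = L.length := pv_shape_len h1
    have hrN : r₀.toNat < L.length := by
      have := ctx.hLlen; omega
    have hrg : r₀.toNat < g.length := by omega
    have hrtn : ((r₀.toNat : Nat) : Int) = r₀ := Int.toNat_of_nonneg h0r
    have hLr : PySem.List.pyGetD L r₀ 0 = min cols (max (n - r₀ * cols) 0) := by
      rw [PySem.List.pyGetD_of_nonneg L 0 h0r, ctx.hLget r₀.toNat hrN, hrtn]
    have hrowlen : ((g.getD r₀.toNat []).length : Int) = min cols (max (n - r₀ * cols) 0) := by
      rw [pv_shape_row h1 _ hrg, ctx.hLget r₀.toNat hrN, hrtn]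
    rw [PySem.List.pyRange_one_cons hlt]
    simp only [pvFillRows]
    by_cases hcase : PySem.List.pyGetD L r₀ 0 ≤ c
    · -- continue: row r₀ has no column c
      rw [if_pos hcase]
      have hkr : pvK full rem c ≤ r₀ := by
        by_contra h
        push_neg at h
        have := (pv_valid ctx r₀ c h0r hc0 hc).mpr h
        rw [hLr] at hcase
        omega
      refine ih (r₀ + 1) (by omega) (by omega) (by omega) (g, idx) ⟨h1, ?_, ?_⟩
      · dsimp only; omega
      · intro r hr c' hc'
        dsimp only at hr hc' ⊢
        rw [h3 r hr c' hc']
        by_cases hrr : r = r₀.toNat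
        · subst hrr
          have hclt : ((c' : Int) < min cols (max (n - r₀ * cols) 0)) := by
            have : (c' : Int) < ((g.getD r₀.toNat []).length : Int) := by exact_mod_cast hc'
            omega
          rw [hLr] at hcase
          exact if_congr (by omega) rfl rfl
        · exact if_congr (by omega) rfl rfl
    · -- fill cell (r₀, c)
      rw [if_neg hcase]
      rw [hLr] at hcase
      have hrk : r₀ < pvK full rem c := (pv_valid ctx r₀ c h0r hc0 hc).mp (by omega)
      have hidx : idx = pvOff full rem c + r₀ := by
        rw [h2]; omega
      have hbreak : ¬ ((bits.length : Int) ≤ idx) := by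
        have hb := pv_off_bound ctx c hc0 hc
        have := ctx.hn
        omega
      rw [if_neg hbreak]
      set v : Int := PySem.Int.mod (PySem.List.pyGetD bits idx 0) 2 with hv
      have hvT : v = pvT bits full rem r₀ c := by
        rw [hv, hidx]; unfold pvT pvOff; rfl
      have hcN : c.toNat < (g.getD r₀.toNat []).length := by omega
      have hctn : ((c.toNat : Nat) : Int) = c := Int.toNat_of_nonneg hc0
      have hsetA : pvSetCell g r₀ c v
          = g.set r₀.toNat ((g.getD r₀.toNat []).set c.toNat v) := by
        unfold pvSetCell
        rw [PySem.List.pyGetD_of_nonneg g [] h0r, PySem.List.pySetD_of_nonneg _ _ hc0,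
          PySem.List.pySetD_of_nonneg _ _ h0r]
      rw [hsetA]
      refine ih (r₀ + 1) (by omega) (by omega) (by omega) _ ⟨?_, ?_, ?_⟩
      · -- shape preserved
        dsimp only
        rw [List.map_set, h1, List.length_set, pv_shape_row h1 _ hrg,
          List.getD_eq_getElem _ _ hrN, List.set_getElem_self]
      · dsimp only; omega
      · intro r hr c' hc'
        dsimp only at hr hc' ⊢
        simp only [List.length_set] at hr
        by_cases hrr : r = r₀.toNat
        · subst hrr
          have hgr : (g.set r₀.toNat ((g.getD r₀.toNat []).set c.toNat v)).getD r₀.toNat []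
              = (g.getD r₀.toNat []).set c.toNat v := by
            rw [List.getD_eq_getElem _ _ (by simpa using hr)]
            exact List.getElem_set_self (by simpa using hr)
          rw [hgr] at hc' ⊢
          rw [List.length_set] at hc'
          by_cases hcc : c' = c.toNat
          · subst hcc
            have hval : ((g.getD r₀.toNat []).set c.toNat v).getD c.toNat 0 = v := by
              rw [List.getD_eq_getElem _ _ (by simpa using hc')]
              exact List.getElem_set_self (by simpa using hc')
            rw [hval, hvT, if_pos (show ((c.toNat : Nat) : Int) < c ∨ (((c.toNat : Nat) : Int) = c ∧ ((r₀.toNat : Nat) : Int) < r₀ + 1) by omega)]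
            simp only [hctn, hrtn]
          · have hval : ((g.getD r₀.toNat []).set c.toNat v).getD c' 0
                = (g.getD r₀.toNat []).getD c' 0 := by
              rw [List.getD_eq_getElem _ _ (by simpa using hc'),
                List.getElem_set_ne (fun h => hcc h.symm) (by simpa using hc'),
                List.getD_eq_getElem _ _ hc']
            rw [hval, h3 r₀.toNat hrg c' hc']
            have hne : (c' : Int) ≠ c := by omega
            exact if_congr (by omega) rfl rfl
        · have hgr : (g.set r₀.toNat ((g.getD r₀.toNat []).set c.toNat v)).getD r []
              = g.getD r [] := by
            rw [List.getD_eq_getElem _ _ (by simpa using hr),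
              List.getElem_set_ne (fun h => hrr h.symm) (by simpa using hr),
              List.getD_eq_getElem _ _ hr]
          rw [hgr] at hc' ⊢
          rw [h3 r hr c' hc']
          exact if_congr (by omega) rfl rfl

-- A's outer column loop: after all columns, every existing cell carries B's gather value
lemma pv_fillColsA {bits L : List Int} {n rows cols full rem : Int}
    (ctx : pvCtx bits L n rows cols full rem) :
    ∀ (fuel : Nat) (c : Int), 0 ≤ c → c ≤ cols → (cols - c).toNat = fuel →
    ∀ st, pvInvA bits L full rem c 0 st →
    pvInvA bits L full rem cols 0
      ((PySem.List.pyRange c cols 1).foldl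
        (fun st col => pvFillRows bits L col (PySem.List.pyRange 0 rows 1) st) st) := by
  intro fuel
  induction fuel with
  | zero =>
    intro c h0c hcc hfuel st hInv
    have hceq : c = cols := by omega
    rw [hceq] at hInv
    rw [hceq, PySem.List.pyRange_one_eq_nil (le_refl cols)]
    simpa using hInv
  | succ fuel ih =>
    intro c h0c hcc hfuel st hInv
    have hrows1 := ctx.hrows
    have hfull0 := ctx.hfull0
    have hlt : c < cols := by omega
    rw [PySem.List.pyRange_one_cons hlt]
    simp only [List.foldl_cons]
    have hstep := pv_fillA ctx c h0c hlt (rows - 0).toNat 0 (by omega) (by omega) rfl st hInv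
    obtain ⟨h1, h2, h3⟩ := hstep
    have hnext : pvInvA bits L full rem (c + 1) 0 (pvFillRows bits L c (PySem.List.pyRange 0 rows 1) st) := by
      refine ⟨h1, ?_, ?_⟩
      · rw [h2, pv_off_succ]
        have hk := pv_k_le_rows ctx c h0c
        have hk0 : 0 ≤ pvK full rem c := by unfold pvK; split_ifs <;> omega
        have hk1 : 0 ≤ pvK full rem (c + 1) := by unfold pvK; split_ifs <;> omega
        omega
      · intro r hr c' hc'
        rw [h3 r hr c' hc']
        have hrrows : (r : Int) < rows := by
          have := pv_shape_len h1
          have := ctx.hLlen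
          omega
        exact if_congr (by omega) rfl rfl
    exact ih (c + 1) (by omega) (by omega) (by omega) _ hnext

lemma pv_foldl_app (l : List Int) : ∀ (acc : List Int), (∀ v ∈ l, 0 ≤ v) →
    l.foldl (fun out v => if 0 ≤ v then out ++ [v] else out) acc = acc ++ l := by
  induction l with
  | nil => intro acc _; simp
  | cons x t ih =>
    intro acc hp
    have hx : 0 ≤ x := hp x (by simp)
    simp only [List.foldl_cons, if_pos hx]
    rw [ih _ (fun v hv => hp v (by simp [hv]))]
    simp

-- A's read-out pass returns the flattened grid when every cell is nonnegative
lemma pv_readout (g : List (List Int)) (L : List Int) (hS : g.map (fun row => (row.length : Int)) = L)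
    (hpos : ∀ v ∈ g.flatten, 0 ≤ v) :
    ∀ (fuel : Nat) (r₀ : Int), 0 ≤ r₀ → r₀ ≤ (g.length : Int) → (((g.length : Int)) - r₀).toNat = fuel →
    ∀ (acc : List Int),
    (PySem.List.pyRange r₀ (g.length : Int) 1).foldl (fun out row =>
      (PySem.List.pyRange 0 (PySem.List.pyGetD L row 0) 1).foldl (fun out col =>
        let value := PySem.List.pyGetD (PySem.List.pyGetD g row []) col (-1)
        if 0 ≤ value then out ++ [value] else out) out) acc
      = acc ++ (g.drop r₀.toNat).flatten := by
  intro fuel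
  induction fuel with
  | zero =>
    intro r₀ h0r hrle hfuel acc
    have hr : r₀ = (g.length : Int) := by omega
    subst hr
    rw [PySem.List.pyRange_one_eq_nil (by omega)]
    simp
  | succ fuel ih =>
    intro r₀ h0r hrle hfuel acc
    have hlt : r₀ < (g.length : Int) := by omega
    have hrN : r₀.toNat < g.length := by omega
    rw [PySem.List.pyRange_one_cons hlt]
    simp only [List.foldl_cons]
    have hrow : PySem.List.pyGetD g r₀ [] = g.getD r₀.toNat [] :=
      PySem.List.pyGetD_of_nonneg g [] h0r
    have hlen : PySem.List.pyGetD L r₀ 0 = ((g.getD r₀.toNat []).length : Int) := by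
      rw [PySem.List.pyGetD_of_nonneg L 0 h0r, ← pv_shape_row hS r₀.toNat hrN]
    rw [hrow, hlen]
    rw [PySem.List.foldl_pyRange_zero_pyGetD' (g.getD r₀.toNat []) (-1)
      (fun out v => if 0 ≤ v then out ++ [v] else out) acc]
    have hposrow : ∀ v ∈ g.getD r₀.toNat [], 0 ≤ v := by
      intro v hv
      refine hpos v (List.mem_flatten.mpr ⟨g.getD r₀.toNat [], ?_, hv⟩)
      rw [List.getD_eq_getElem _ _ hrN]
      exact List.getElem_mem hrN
    rw [pv_foldl_app _ acc hposrow]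
    rw [ih (r₀ + 1) (by omega) (by omega) (by omega) (acc ++ g.getD r₀.toNat [])]
    have hdrop : g.drop r₀.toNat = g.getD r₀.toNat [] :: g.drop (r₀.toNat + 1) := by
      rw [List.getD_eq_getElem _ _ hrN]
      exact (List.getElem_cons_drop hrN).symm
    have htn : (r₀ + 1).toNat = r₀.toNat + 1 := by omega
    rw [htn, hdrop]
    simp

-- ===== VERDICT (by name: the statement is the Claim_ definition above) =====
theorem deinterleave_bits_spec : Claim_equal_deinterleave_bits := by
  intro bits depth _
  unfold Spec_deinterleave_bits
  by_cases hg : depth ≤ 1 ∨ bits = []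
  · simp only [deinterleave_bits, deinterleave_bits_alt, if_pos hg]
  · simp only [deinterleave_bits, deinterleave_bits_alt, if_neg hg]
    rw [not_or] at hg
    obtain ⟨hd, hb⟩ := hg
    set n : Int := (bits.length : Int) with hn_def
    have hn1 : 1 ≤ n := by
      have := List.length_pos_iff.mpr hb
      omega
    set rows : Int := max depth 1 with hrows_def
    have hrows : 1 ≤ rows := by omega
    set cols : Int := PySem.Int.floordiv (n + rows - 1) rows with hcols_def
    have hcols_ediv : cols = (n + rows - 1) / rows := by
      rw [hcols_def, PySem.Int.floordiv_eq_ediv_of_pos (by omega)]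
    have h1 := Int.mul_ediv_add_emod (n + rows - 1) rows
    have h2 := Int.emod_nonneg (n + rows - 1) (by omega : rows ≠ 0)
    have h3 := Int.emod_lt_of_pos (n + rows - 1) (by omega : 0 < rows)
    have hnle : n ≤ rows * cols := by rw [hcols_ediv]; linarith
    have hcols1 : 1 ≤ cols := by
      by_contra h
      push_neg at h
      have := mul_le_mul_of_nonneg_left (by omega : cols ≤ 0) (by omega : (0:Int) ≤ rows)
      simp only [mul_zero] at this
      omega
    set full : Int := PySem.Int.floordiv n cols with hfull_def
    set rem : Int := PySem.Int.mod n cols with hrem_def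
    have hfull_ediv : full = n / cols := by
      rw [hfull_def, PySem.Int.floordiv_eq_ediv_of_pos (by omega)]
    have hrem_emod : rem = n % cols := by
      rw [hrem_def, PySem.Int.mod_eq_emod_of_pos (by omega)]
    have hnfr : n = full * cols + rem := by
      have h4 := Int.mul_ediv_add_emod n cols
      have h5 : cols * (n / cols) = n / cols * cols := mul_comm _ _
      rw [hfull_ediv, hrem_emod]
      omega
    have hrem0 : 0 ≤ rem := by
      rw [hrem_emod]; exact Int.emod_nonneg n (by omega)
    have hremc : rem < cols := by
      rw [hrem_emod]; exact Int.emod_lt_of_pos n (by omega)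
    have hfull0 : 0 ≤ full := by
      rw [hfull_ediv]; exact Int.ediv_nonneg (by omega) (by omega)
    set L : List Int := (PySem.List.pyRange 0 rows 1).map
      (fun row => min cols (max (n - row * cols) 0)) with hL_def
    have hLlen : (L.length : Int) = rows := by
      rw [hL_def]
      simp [PySem.List.length_pyRange_one]
      omega
    have hLget : ∀ rN : Nat, rN < L.length → L.getD rN 0 = min cols (max (n - (rN : Int) * cols) 0) := by
      intro rN hr
      rw [hL_def] at hr ⊢
      rw [List.getD_eq_getElem _ _ hr]
      simp [PySem.List.getElem_pyRange_one]
    have ctx : pvCtx bits L n rows cols full rem :=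
      ⟨hn_def, hn1, hrows, hcols1, hnle, hnfr, hrem0, hremc, hfull0, hLlen, hLget⟩
    set grid0 : List (List Int) := (PySem.List.pyRange 0 rows 1).map
      (fun row => List.replicate (PySem.List.pyGetD L row 0).toNat (-1)) with hg0_def
    have hShape0 : grid0.map (fun row => (row.length : Int)) = L := by
      rw [hg0_def, List.map_map]
      conv_rhs => rw [hL_def]
      apply List.map_congr_left
      intro x hx
      obtain ⟨hx0, hxr⟩ := PySem.List.mem_pyRange_one.mp hx
      have hxx : ((x.toNat : Nat) : Int) = x := Int.toNat_of_nonneg hx0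
      simp only [Function.comp_def, List.length_replicate]
      rw [PySem.List.pyGetD_of_nonneg L 0 hx0]
      have hxL : x.toNat < L.length := by omega
      rw [hLget x.toNat hxL, hxx, Int.toNat_of_nonneg (by omega)]
    have hneg0 : ∀ v ∈ grid0.flatten, v = -1 := by
      intro v hv
      obtain ⟨row, hrow, hvrow⟩ := List.mem_flatten.mp hv
      rw [hg0_def] at hrow
      obtain ⟨x, hx, rfl⟩ := List.mem_map.mp hrow
      exact List.eq_of_mem_replicate hvrow
    have hInv0 : pvInvA bits L full rem 0 0 (grid0, 0) := by
      refine ⟨hShape0, ?_, ?_⟩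
      · show (0 : Int) = _
        have hk0 : 0 ≤ pvK full rem 0 := by unfold pvK; split_ifs <;> omega
        unfold pvOff
        have : full * (0:Int) = 0 := mul_zero full
        omega
      · intro r hr c' hc'
        dsimp only at hr hc' ⊢
        have hcell : (grid0.getD r []).getD c' 0 = -1 := by
          have hmem : (grid0.getD r []).getD c' 0 ∈ grid0.flatten := by
            refine List.mem_flatten.mpr ⟨grid0.getD r [], ?_, ?_⟩
            · rw [List.getD_eq_getElem _ _ hr]; exact List.getElem_mem hr
            · rw [List.getD_eq_getElem _ _ hc']; exact List.getElem_mem hc'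
          exact hneg0 _ hmem
        rw [hcell]
        rw [if_neg (by omega)]
    have hfill := pv_fillColsA ctx cols.toNat 0 le_rfl (by omega) (by omega) (grid0, 0) hInv0
    set P := (PySem.List.pyRange 0 cols 1).foldl
      (fun st col => pvFillRows bits L col (PySem.List.pyRange 0 rows 1) st) (grid0, 0) with hP
    obtain ⟨hS, _, hCells⟩ := hfill
    -- every existing cell now carries B's gather value
    have hcellT : ∀ r, r < P.1.length → ∀ c', c' < (P.1.getD r []).length →
        (P.1.getD r []).getD c' 0 = pvT bits full rem r c' := by
      intro r hr c' hc'
      rw [hCells r hr c' hc']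
      have hcc : ((c' : Int)) < cols := by
        have h := pv_shape_row hS r hr
        have hrL : r < L.length := by rw [← pv_shape_len hS]; exact hr
        rw [hLget r hrL] at h
        have : (c' : Int) < ((P.1.getD r []).length : Int) := by exact_mod_cast hc'
        omega
      rw [if_pos (by omega)]
    have hpos : ∀ v ∈ P.1.flatten, 0 ≤ v := by
      intro v hv
      obtain ⟨row, hrow, hvrow⟩ := List.mem_flatten.mp hv
      obtain ⟨r, hr, rfl⟩ := List.getElem_of_mem hrow
      obtain ⟨cc, hcc, rfl⟩ := List.getElem_of_mem hvrow
      have hcc' : cc < (P.1.getD r []).length := by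
        rw [List.getD_eq_getElem _ _ hr]; exact hcc
      have := hcellT r hr cc hcc'
      rw [List.getD_eq_getElem _ _ hr, List.getD_eq_getElem _ _ hcc] at this
      rw [this]
      exact pv_mod2_nonneg _
    have hPlen : ((P.1.length : Nat) : Int) = rows := by
      rw [pv_shape_len hS]; exact hLlen
    -- A's read-out = flattened grid
    rw [show PySem.List.pyRange 0 rows 1 = PySem.List.pyRange 0 ((P.1.length : Nat) : Int) 1 by
      rw [hPlen]]
    rw [pv_readout P.1 L hS hpos P.1.length 0 le_rfl (by omega) (by omega) []]
    simp only [Int.toNat_zero, List.drop_zero, List.nil_append]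
    -- B's fold = flatten of gather rows
    rw [show PySem.List.pyRange 0 ((P.1.length : Nat) : Int) 1 = PySem.List.pyRange 0 rows 1 by
      rw [hPlen]]
    rw [PySem.List.foldl_append_eq_flatMap]
    rw [List.nil_append, List.flatMap_def]
    -- the grid IS the list of gather rows
    congr 1
    apply List.ext_getElem
    · rw [List.length_map]
      have : ((PySem.List.pyRange 0 rows 1).length : Int) = rows := by
        simp [PySem.List.length_pyRange_one]; omega
      have := pv_shape_len hS
      omega
    · intro r hr1 hr2
      rw [List.length_map] at hr2
      rw [List.getElem_map]
      have hrI : ((PySem.List.pyRange 0 rows 1)[r]'hr2) = (r : Int) := by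
        rw [PySem.List.getElem_pyRange_one]; omega
      rw [hrI]
      have hrL : r < L.length := by rw [← pv_shape_len hS]; exact hr1
      have hlenr : ((P.1[r].length : Nat) : Int) = min cols (max (n - (r : Int) * cols) 0) := by
        have h := pv_shape_row hS r hr1
        rw [List.getD_eq_getElem _ _ hr1] at h
        rw [h, hLget r hrL]
      apply List.ext_getElem
      · rw [List.length_map, PySem.List.length_pyRange_one]
        omega
      · intro c hc1 hc2
        rw [List.length_map] at hc2
        rw [List.getElem_map]
        have hcI : ((PySem.List.pyRange 0 (min cols (max (n - (r:Int) * cols) 0)) 1)[c]'hc2) = (c : Int) := by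
          rw [PySem.List.getElem_pyRange_one]; omega
        rw [hcI]
        have := hcellT r hr1 c (by rw [List.getD_eq_getElem _ _ hr1]; exact hc1)
        rw [List.getD_eq_getElem _ _ hr1, List.getD_eq_getElem _ _ hc1] at this
        rw [this]
        unfold pvT
        ring_nf
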